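/-
  THE START MACHINE OF THE THEOREM, and what the proof knows of it.

  c/harness.py builds a MEMORY FILE, loaded at 100000H (file offset = address - 100000H; 16 MB of RAM, unwritten RAM reads 0):

      100000H   the image (<prog>.bin): the start stub, __asan_report, .text; after the text .rodata .init_array .data; the .bss
                follows up to `__image_end` and is NOT in the file (it reads 0)
      1FF000H   the parameter block, six 8-byte words: +0 in = 200000H, +8 len, +10H out = 400000H, +18H cap = 300000H,
                +30H arena = 800000H, +38H arena_len = 400000H            (+20H, +28H: results, written by the stub)
      200000H   IN: the input, `len` ≤ 1FF000H bytes
      400000H   OUT: 300000H bytes                     700000H … 800000H  the stack (RSP = 800000H on entry)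
      800000H   ARENA / HEAP: 400000H bytes, all the program's dynamic memory
      C00000H   SHADOW: 200000H bytes, the shadow byte of address a at C00000H + a / 8
                INITIAL SHADOW: FFH (not accessible) everywhere, except 0 for the image (up to `__image_end` rounded up to 8),
                OUT and the stack, and for the `len` bytes of IN exactly (a last partial granule has shadow `len % 8`).
                The arena starts wholly poisoned.

      Image          the linked image as this file needs it: its bytes, `__image_end`, `__text_end`, and the three addresses of the
                     statement (the stub's entry, its exit HLT, `__asan_report`). A PARAMETER: each program instantiates it from its symbols.
      memByte        the byte of the memory file at an address: harness.py's `memfile`, as a function of the address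
      initShadow     the initial shadow byte of the granule of an address
      file           the memory file as a `ByteArray` (D00000H bytes)
      start_layout_has  the user region of the start layout contains [100000H, E00000H)
      start          `User.startMachine c (file im inp) im.entry 800000H`: for c = 0 the machine `interp` builds (`start_is_interp`)
      startU         its user state

  THE FACTS THE PROOF STARTS FROM (all about `startU`, which is in the relation with `start`: `start_abs`):
      start_read / start_read_word   every byte of the flat memory in [100000H, E00000H) is `memByte`
      start_image   start_text   start_input
                                     `CodeAt`: the image's bytes (its code: `im.text`) from 100000H, the input's bytes from 200000H
      start_param                    the six parameter words, as 8-byte loads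
      start_zero                     .bss, the gap to the parameters, OUT, the stack, the arena read 0
      start_shadowOf                 every shadow byte is `initShadow`
      start_covers   start_sealed    `Asan.Covers (InitLive …)`, `Asan.Sealed`: the shadow invariants hold at the start
      start_reg  start_rip  start_flags  start_df  start_mxcsr  start_sse_masks  start_zmm
                                     RSP = 800000H, every other general register 0, RIP = the entry, RFLAGS = 2 (so DF = 0),
                                     MXCSR = 1F80H (the six exception masks set), the vector registers 0

  CROSS-CHECK against harness.py: check/StartCheck.lean (outside the library) writes `file` for an image and an input to
  disk; check/startcheck.py compares it with what `harness.memfile` writes: byte-identical (13,631,488 bytes).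
-/
import Asan.Shadow
import X86.Derived.User.Start
namespace ProgX
open X86 X86.User Asan

/-! ### The image -/

/-- The linked image, as far as the start machine and the statement need it. -/
structure Image where
  /-- the bytes of the flat binary, loaded at 100000H (`.text`, `.rodata`, `.init_array`, `.data`; not the `.bss`) -/
  bytes : Array UInt8
  /-- `__image_end`: one past the `.bss` -/
  imageEnd : Nat
  /-- `__text_end`: one past the code -/
  textEnd : Nat
  /-- the entry of the start stub (`_start`) -/
  entry : Word
  /-- `prog_exit`: the HLT of the normal exit -/
  exit : Word
  /-- `__asan_report`: where a failed check jumps -/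
  report : Word

/-- What link.ld asserts of an image: it ends below 1F0000H, the file's bytes lie inside it, the code comes first. -/
structure Image.OK (im : Image) : Prop where
  size : 0x100000 + im.bytes.size ≤ im.imageEnd
  end_le : im.imageEnd ≤ 0x1F0000
  text_le : im.textEnd ≤ 0x100000 + im.bytes.size
  text_ge : 0x100000 ≤ im.textEnd

/-! ### The memory file, byte by byte -/

/-- Byte `i` of the 8-byte little-endian word `w`. -/
def wordByte (w i : Nat) : UInt8 := UInt8.ofNat (w / 256 ^ i % 256)

/-- Word `k` of the parameter block at 1FF000H (harness.py: `struct.pack("<4Q", IN, len, OUT, cap)` at +0 and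
`struct.pack("<2Q", ARENA, arena_len)` at +30H). -/
def paramWord (len : Nat) (k : Nat) : Nat :=
  match k with
  | 0 => 0x200000
  | 1 => len
  | 2 => 0x400000
  | 3 => 0x300000
  | 6 => 0x800000
  | 7 => 0x400000
  | _ => 0

/-- **The initial shadow byte of the granule that contains address `a`** (harness.py: all FFH, then `set_shadow` for the image,
IN, OUT, the stack, in this order: a later one wins, so the tests below run in the opposite order). -/
def initShadow (imageEnd len a : Nat) : UInt8 :=
  if 0x700000 ≤ a ∧ a < 0x800000 then 0                                        -- the stack
  else if 0x400000 ≤ a ∧ a < 0x700000 then 0                                   -- OUT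
  else if 0x200000 ≤ a ∧ a / 8 * 8 + 8 ≤ 0x200000 + len then 0                 -- IN: a granule wholly inside the input
  else if 0x200000 ≤ a ∧ a / 8 * 8 < 0x200000 + len then UInt8.ofNat (len % 8) -- IN: the last, partial granule
  else if 0x100000 ≤ a ∧ a < (imageEnd + 7) / 8 * 8 then 0                     -- the image, `__image_end` rounded up to 8
  else 0xFF                                                                    -- everything else: not accessible

/-- **The byte of the memory file at address `a`** (harness.py `memfile`: image, parameters, input, shadow written in this
order into a zero file: a later one wins, so the tests below run in the opposite order). -/
def memByte (im : Image) (inp : List UInt8) (a : Nat) : UInt8 :=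
  if 0xC00000 ≤ a ∧ a < 0xE00000 then
    initShadow im.imageEnd inp.length (8 * (a - 0xC00000))
  else if 0x200000 ≤ a ∧ a < 0x200000 + inp.length then
    inp.getD (a - 0x200000) 0
  else if (0x1FF000 ≤ a ∧ a < 0x1FF020) ∨ (0x1FF030 ≤ a ∧ a < 0x1FF040) then
    wordByte (paramWord inp.length ((a - 0x1FF000) / 8)) (a % 8)
  else if 0x100000 ≤ a ∧ a < 0x100000 + im.bytes.size then
    im.bytes.getD (a - 0x100000) 0
  else
    0

/-- **The memory file**: D00000H bytes, for the addresses 100000H … DFFFFFH. -/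
def file (im : Image) (inp : List UInt8) : ByteArray :=
  ⟨Array.ofFn (n := 0xD00000) fun i => memByte im inp (0x100000 + i.val)⟩

theorem file_size (im : Image) (inp : List UInt8) : (file im inp).size = 0xD00000 := by
  show (Array.ofFn _).size = _
  rw [Array.size_ofFn]

theorem file_get (im : Image) (inp : List UInt8) (i : Nat) (hi : i < 0xD00000) :
    (file im inp).get! i = memByte im inp (0x100000 + i) := by
  show (Array.ofFn (n := 0xD00000) fun i => memByte im inp (0x100000 + i.val))[i]! = _
  rw [getElem!_pos _ i (by rw [Array.size_ofFn]; exact hi), Array.getElem_ofFn]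

/- From here on the file is opaque: nothing should unfold its D00000H-element `Array.ofFn`. -/
attribute [irreducible] file

/-! ### The start machine -/

/-- RSP on entry: the top of the stack. -/
def RSP0 : Word := 0x800000

/-- **The start machine of the theorem.** -/
def start (im : Image) (c : Nat) (inp : List UInt8) : Machine :=
  User.startMachine c (file im inp) im.entry RSP0

/-- Its user state. -/
def startU (im : Image) (c : Nat) (inp : List UInt8) : State :=
  User.startState c (file im inp) im.entry RSP0

theorem file_size_le (im : Image) (inp : List UInt8) : (file im inp).size ≤ 0x1000000 := by
  rw [file_size]
  omega

/-- **The start machine is in the user relation with its user state** (size condition of `User.start_abs`: the file has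
D00000H ≤ 1000000H bytes; the start layout — 8 pages of 2 MB, user region [100000H, 1000000H) — covers the whole memory map). -/
theorem start_abs (im : Image) (c : Nat) (hc : c = 0 ∨ c = 3) (inp : List UInt8) :
    Abs (startLayout c hc) (start im c inp) (startU im c inp) :=
  User.start_abs c hc (file im inp) im.entry RSP0 (file_size_le im inp)

/-- **The start layout covers the whole memory map**: every range inside [100000H, E00000H) — image, parameters, input, output,
stack, arena, shadow — is inside the user region (which goes on to 1000000H). -/
theorem start_layout_has (c : Nat) (hc : c = 0 ∨ c = 3) (a : Word) (n : Nat) (h1 : 0x100000 ≤ a.toNat)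
    (h2 : a.toNat + n ≤ 0xE00000) : (startLayout c hc).Has a n := by
  have hhi := startLayout_hi c hc
  unfold Layout.Has Layout.lo
  omega

/-- At ring 0 the start machine is literally what `interp FILE --mode 64 --base 0x100000 --entry E --esp 0x800000` builds
(harness.py's command line; `--mem-mb 16` is the default). -/
theorem start_is_interp (im : Image) (inp : List UInt8) (name : String) (e : Nat) (he : im.entry = UInt64.ofNat e) :
    Interp.setup { image := name, mode := 64, base := 0x100000, entry := some e, esp := 0x800000 } (file im inp) =
      .ok (start im 0 inp) := by
  have h := User.setup_eq name (file im inp) e 0x800000 (by rw [file_size]; omega) (by omega)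
  rw [h]
  unfold start RSP0
  rw [he]
  rfl

/-! ### Memory of the start state -/

/-- **Every byte of the flat memory in [100000H, E00000H) is the byte of the memory file.** -/
theorem start_read (im : Image) (c : Nat) (hc : c = 0 ∨ c = 3) (inp : List UInt8) (a : Nat)
    (h1 : 0x100000 ≤ a) (h2 : a < 0xE00000) :
    (startU im c inp).mem.read (UInt64.ofNat a) = memByte im inp a := by
  have hi : a - 0x100000 < (file im inp).size := by
    rw [file_size]
    omega
  have h := User.startState_image c hc (file im inp) im.entry RSP0 (file_size_le im inp) (a - 0x100000) hi
  have ea : (0x100000 : Word) + UInt64.ofNat (a - 0x100000) = UInt64.ofNat a := by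
    apply UInt64.toNat_inj.mp
    rw [User.toNat_add_ofNat _ _ (by simp only [UInt64.reduceToNat]; omega), UInt64.toNat_ofNat']
    simp only [UInt64.reduceToNat]
    omega
  rw [ea] at h
  have hi' : a - 0x100000 < 0xD00000 := by omega
  have hg := file_get im inp (a - 0x100000) hi'
  have eb : 0x100000 + (a - 0x100000) = a := by omega
  rw [eb] at hg
  exact h.trans hg

/-- The same, for an address that is a word. -/
theorem start_read_word (im : Image) (c : Nat) (hc : c = 0 ∨ c = 3) (inp : List UInt8) (w : Word)
    (h1 : 0x100000 ≤ w.toNat) (h2 : w.toNat < 0xE00000) :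
    (startU im c inp).mem.read w = memByte im inp w.toNat := by
  have h := start_read im c hc inp w.toNat h1 h2
  rw [UInt64.ofNat_toNat] at h
  exact h

/-- `base + i` as a number, for the constant bases of the memory map. -/
theorem toNat_base_add (base : Word) (i : Nat) (h : base.toNat + i < 2 ^ 64) :
    (base + UInt64.ofNat i).toNat = base.toNat + i :=
  User.toNat_add_ofNat base i h

/-- **The image's bytes are in memory from 100000H.** -/
theorem start_image (im : Image) (him : im.OK) (c : Nat) (hc : c = 0 ∨ c = 3) (inp : List UInt8) :
    CodeAt (startU im c inp).mem 0x100000 im.bytes.toList := by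
  intro i hi
  have hsz := him.size
  have hend := him.end_le
  have hi' : i < im.bytes.size := by
    rw [Array.length_toList] at hi
    exact hi
  have e : ((0x100000 : Word) + UInt64.ofNat i).toNat = 0x100000 + i := toNat_base_add _ _ (by
    simp only [UInt64.reduceToNat]
    omega)
  rw [start_read_word im c hc inp _ (by omega) (by omega), e]
  unfold memByte
  have c1 : ¬ (0xC00000 ≤ 0x100000 + i ∧ 0x100000 + i < 0xE00000) := by omega
  have c2 : ¬ (0x200000 ≤ 0x100000 + i ∧ 0x100000 + i < 0x200000 + inp.length) := by omega
  have c3 : ¬ ((0x1FF000 ≤ 0x100000 + i ∧ 0x100000 + i < 0x1FF020) ∨ (0x1FF030 ≤ 0x100000 + i ∧ 0x100000 + i < 0x1FF040)) := by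
    omega
  have c4 : 0x100000 ≤ 0x100000 + i ∧ 0x100000 + i < 0x100000 + im.bytes.size := by omega
  rw [if_neg c1, if_neg c2, if_neg c3, if_pos c4]
  have e2 : 0x100000 + i - 0x100000 = i := by omega
  rw [e2, Array.getD_eq_getD_getElem?, Array.getElem?_eq_getElem hi', Option.getD_some, Array.getElem_toList]

/-- The code of the image: the bytes up to `__text_end`. (The invariant "the code is in memory and is never written" of
UserX/Contract.lean is about these; the data that follows is written by the program.) -/
def Image.text (im : Image) : List UInt8 := im.bytes.toList.take (im.textEnd - 0x100000)

/-- **The code is in memory from 100000H.** -/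
theorem start_text (im : Image) (him : im.OK) (c : Nat) (hc : c = 0 ∨ c = 3) (inp : List UInt8) :
    CodeAt (startU im c inp).mem 0x100000 im.text := by
  intro i hi
  unfold Image.text at hi ⊢
  rw [List.length_take] at hi
  have hi' : i < im.bytes.toList.length := by omega
  rw [start_image im him c hc inp i hi', List.getElem_take]

/-- **The input's bytes are in memory from 200000H.** -/
theorem start_input (im : Image) (c : Nat) (hc : c = 0 ∨ c = 3) (inp : List UInt8) (hlen : inp.length ≤ 0x1FF000) :
    CodeAt (startU im c inp).mem 0x200000 inp := by
  intro i hi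
  have e : ((0x200000 : Word) + UInt64.ofNat i).toNat = 0x200000 + i := toNat_base_add _ _ (by
    simp only [UInt64.reduceToNat]
    omega)
  rw [start_read_word im c hc inp _ (by omega) (by omega), e]
  unfold memByte
  have c1 : ¬ (0xC00000 ≤ 0x200000 + i ∧ 0x200000 + i < 0xE00000) := by omega
  have c2 : 0x200000 ≤ 0x200000 + i ∧ 0x200000 + i < 0x200000 + inp.length := by omega
  rw [if_neg c1, if_pos c2]
  have e2 : 0x200000 + i - 0x200000 = i := by omega
  rw [e2, List.getD_eq_getElem?_getD, List.getElem?_eq_getElem hi, Option.getD_some]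

/-- **What reads 0**: the `.bss` and the gap up to the parameter block, the two result words of the block and its tail, the
rest of IN, OUT, the stack, the arena. -/
theorem start_zero (im : Image) (him : im.OK) (c : Nat) (hc : c = 0 ∨ c = 3) (inp : List UInt8) (a : Nat)
    (h : (0x100000 + im.bytes.size ≤ a ∧ a < 0x1FF000) ∨ (0x1FF020 ≤ a ∧ a < 0x1FF030) ∨ (0x1FF040 ≤ a ∧ a < 0x200000) ∨
         (0x200000 + inp.length ≤ a ∧ a < 0xC00000)) :
    (startU im c inp).mem.read (UInt64.ofNat a) = 0 := by
  have hsz := him.size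
  have hend := him.end_le
  rw [start_read im c hc inp a (by omega) (by omega)]
  unfold memByte
  have c1 : ¬ (0xC00000 ≤ a ∧ a < 0xE00000) := by omega
  have c2 : ¬ (0x200000 ≤ a ∧ a < 0x200000 + inp.length) := by omega
  have c3 : ¬ ((0x1FF000 ≤ a ∧ a < 0x1FF020) ∨ (0x1FF030 ≤ a ∧ a < 0x1FF040)) := by omega
  have c4 : ¬ (0x100000 ≤ a ∧ a < 0x100000 + im.bytes.size) := by omega
  rw [if_neg c1, if_neg c2, if_neg c3, if_neg c4]

/-- A little-endian load of `n` bytes that are the bytes of `w`. -/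
theorem readLE_of_wordBytes (mem : Mem) (a : Word) (n w : Nat)
    (h : ∀ i, i < n → mem.read (a + UInt64.ofNat i) = wordByte w i) : mem.readLE a n = w % 256 ^ n := by
  induction n generalizing a w with
  | zero => simp [Mem.readLE, Nat.mod_one]
  | succ n ih =>
    simp only [Mem.readLE]
    have h0 := h 0 (Nat.succ_pos n)
    simp only [UInt64.reduceOfNat, UInt64.add_zero] at h0
    have hrest : ∀ i, i < n → mem.read (a + 1 + UInt64.ofNat i) = wordByte (w / 256) i := by
      intro i hi
      rw [Mem.add_ofNat_succ, h (i + 1) (by omega)]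
      unfold wordByte
      rw [Nat.div_div_eq_div_mul, Nat.pow_succ, Nat.mul_comm]
    rw [h0, ih (a + 1) (w / 256) hrest]
    unfold wordByte
    rw [UInt8.toNat_ofNat']
    simp only [Nat.pow_zero, Nat.div_one, Nat.mod_mod]
    rw [Nat.pow_succ, Nat.mul_comm (256 ^ n) 256, Nat.mod_mul]

/-- **The parameter block**: the 8-byte load at `1FF000H + 8 k` gives word `k` (k = 0, 1, 2, 3, 6, 7: in, len, out, cap,
arena, arena_len). -/
theorem start_param (im : Image) (c : Nat) (hc : c = 0 ∨ c = 3) (inp : List UInt8) (hlen : inp.length ≤ 0x1FF000) (k : Nat)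
    (hk : k < 4 ∨ k = 6 ∨ k = 7) :
    (startU im c inp).mem.readLE (UInt64.ofNat (0x1FF000 + 8 * k)) 8 = paramWord inp.length k := by
  have hw : paramWord inp.length k < 256 ^ 8 := by
    unfold paramWord
    rcases hk with hk | hk | hk
    · have : k = 0 ∨ k = 1 ∨ k = 2 ∨ k = 3 := by omega
      rcases this with rfl | rfl | rfl | rfl <;> simp only <;> omega
    · subst hk
      simp only
      omega
    · subst hk
      simp only
      omega
  rw [readLE_of_wordBytes _ _ 8 (paramWord inp.length k), Nat.mod_eq_of_lt hw]
  intro i hi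
  have e : UInt64.ofNat (0x1FF000 + 8 * k) + UInt64.ofNat i = UInt64.ofNat (0x1FF000 + 8 * k + i) :=
    (UInt64.ofNat_add _ _).symm
  rw [e, start_read im c hc inp _ (by omega) (by omega)]
  unfold memByte
  have c1 : ¬ (0xC00000 ≤ 0x1FF000 + 8 * k + i ∧ 0x1FF000 + 8 * k + i < 0xE00000) := by omega
  have c2 : ¬ (0x200000 ≤ 0x1FF000 + 8 * k + i ∧ 0x1FF000 + 8 * k + i < 0x200000 + inp.length) := by omega
  have c3 : (0x1FF000 ≤ 0x1FF000 + 8 * k + i ∧ 0x1FF000 + 8 * k + i < 0x1FF020) ∨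
      (0x1FF030 ≤ 0x1FF000 + 8 * k + i ∧ 0x1FF000 + 8 * k + i < 0x1FF040) := by omega
  rw [if_neg c1, if_neg c2, if_pos c3]
  have e1 : (0x1FF000 + 8 * k + i - 0x1FF000) / 8 = k := by omega
  have e2 : (0x1FF000 + 8 * k + i) % 8 = i := by omega
  rw [e1, e2]

/-! ### The initial shadow -/

/-- **Every shadow byte of the start state is `initShadow`.** -/
theorem start_shadowOf (im : Image) (c : Nat) (hc : c = 0 ∨ c = 3) (inp : List UInt8) (g : Nat) (hg : g < 0x200000) :
    shadowOf (startU im c inp).mem g = (initShadow im.imageEnd inp.length (8 * g)).toNat := by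
  unfold shadowOf shadowAddr
  rw [start_read im c hc inp _ (by omega) (by omega)]
  unfold memByte
  have c1 : 0xC00000 ≤ 0xC00000 + g ∧ 0xC00000 + g < 0xE00000 := by omega
  rw [if_pos c1]
  have e : 0xC00000 + g - 0xC00000 = g := by omega
  rw [e]

/-- The bytes that are accessible at the start: the image up to `__image_end` rounded up to 8, the input exactly, OUT and the
stack. (Not the parameter block, not the arena.) -/
def InitLive (imageEnd len : Nat) (a : Nat) : Prop :=
  (0x100000 ≤ a ∧ a < (imageEnd + 7) / 8 * 8) ∨ (0x200000 ≤ a ∧ a < 0x200000 + len) ∨ (0x400000 ≤ a ∧ a < 0x800000)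

/-- **The initial shadow covers the initially live bytes.** -/
theorem start_covers (im : Image) (him : im.OK) (c : Nat) (hc : c = 0 ∨ c = 3) (inp : List UInt8)
    (hlen : inp.length ≤ 0x1FF000) : Covers (InitLive im.imageEnd inp.length) (startU im c inp).mem := by
  have hend := him.end_le
  constructor
  · intro a ha
    unfold InitLive at ha
    omega
  · intro a ha
    have hin : 0x100000 ≤ a ∧ a < 0xC00000 := by
      unfold InitLive at ha
      omega
    unfold GranOK GranOKv shadowByte
    rw [start_shadowOf im c hc inp (a / 8) (by omega)]
    unfold initShadow
    unfold InitLive at ha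
    have e8 : 8 * (a / 8) / 8 * 8 = 8 * (a / 8) := by omega
    rw [e8]
    by_cases b1 : 0x700000 ≤ 8 * (a / 8) ∧ 8 * (a / 8) < 0x800000
    · rw [if_pos b1]
      exact Or.inl rfl
    · rw [if_neg b1]
      by_cases b2 : 0x400000 ≤ 8 * (a / 8) ∧ 8 * (a / 8) < 0x700000
      · rw [if_pos b2]
        exact Or.inl rfl
      · rw [if_neg b2]
        by_cases b3 : 0x200000 ≤ 8 * (a / 8) ∧ 8 * (a / 8) + 8 ≤ 0x200000 + inp.length
        · rw [if_pos b3]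
          exact Or.inl rfl
        · rw [if_neg b3]
          by_cases b4 : 0x200000 ≤ 8 * (a / 8) ∧ 8 * (a / 8) < 0x200000 + inp.length
          · rw [if_pos b4]
            right
            rw [UInt8.toNat_ofNat']
            omega
          · rw [if_neg b4]
            have b5 : 0x100000 ≤ 8 * (a / 8) ∧ 8 * (a / 8) < (im.imageEnd + 7) / 8 * 8 := by omega
            rw [if_pos b5]
            exact Or.inl rfl

/-- **The initial shadow is sealed**: the shadow bytes of everything below 1 MB and from C00000H up are FFH. -/
theorem start_sealed (im : Image) (him : im.OK) (c : Nat) (hc : c = 0 ∨ c = 3) (inp : List UInt8)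
    (hlen : inp.length ≤ 0x1FF000) : Sealed (startU im c inp).mem := by
  have hend := him.end_le
  intro g hg hout
  rw [start_shadowOf im c hc inp g hg]
  unfold initShadow
  have b1 : ¬ (0x700000 ≤ 8 * g ∧ 8 * g < 0x800000) := by omega
  have b2 : ¬ (0x400000 ≤ 8 * g ∧ 8 * g < 0x700000) := by omega
  have b3 : ¬ (0x200000 ≤ 8 * g ∧ 8 * g / 8 * 8 + 8 ≤ 0x200000 + inp.length) := by omega
  have b4 : ¬ (0x200000 ≤ 8 * g ∧ 8 * g / 8 * 8 < 0x200000 + inp.length) := by omega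
  have b5 : ¬ (0x100000 ≤ 8 * g ∧ 8 * g < (im.imageEnd + 7) / 8 * 8) := by omega
  rw [if_neg b1, if_neg b2, if_neg b3, if_neg b4, if_neg b5]
  decide

/-- **The arena starts wholly poisoned**: the shadow bytes of [800000H, C00000H) are FFH. -/
theorem start_arena_poisoned (im : Image) (him : im.OK) (c : Nat) (hc : c = 0 ∨ c = 3) (inp : List UInt8)
    (hlen : inp.length ≤ 0x1FF000) (g : Nat) (hg : 0x100000 ≤ g ∧ g < 0x180000) :
    shadowOf (startU im c inp).mem g = 0xFF := by
  have hend := him.end_le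
  rw [start_shadowOf im c hc inp g (by omega)]
  unfold initShadow
  have b1 : ¬ (0x700000 ≤ 8 * g ∧ 8 * g < 0x800000) := by omega
  have b2 : ¬ (0x400000 ≤ 8 * g ∧ 8 * g < 0x700000) := by omega
  have b3 : ¬ (0x200000 ≤ 8 * g ∧ 8 * g / 8 * 8 + 8 ≤ 0x200000 + inp.length) := by omega
  have b4 : ¬ (0x200000 ≤ 8 * g ∧ 8 * g / 8 * 8 < 0x200000 + inp.length) := by omega
  have b5 : ¬ (0x100000 ≤ 8 * g ∧ 8 * g < (im.imageEnd + 7) / 8 * 8) := by omega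
  rw [if_neg b1, if_neg b2, if_neg b3, if_neg b4, if_neg b5]
  decide

/-- **The heap region's control cell reads 0**: the 8-byte load at 800000H (c/base/heap.c keeps its one word of state, `used`, there;
the premise `hcell` of `Asan.HeapInv.empty`). Part of `start_zero`: the whole region [800000H, C00000H) reads 0. -/
theorem start_heap_cell (im : Image) (him : im.OK) (c : Nat) (hc : c = 0 ∨ c = 3) (inp : List UInt8)
    (hlen : inp.length ≤ 0x1FF000) : (startU im c inp).mem.readLE 0x800000 8 = 0 := by
  have hz : ∀ i, i < 8 → (startU im c inp).mem.read ((0x800000 : Word) + UInt64.ofNat i) = wordByte 0 i := by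
    intro i hi
    have e : (0x800000 : Word) + UInt64.ofNat i = UInt64.ofNat (0x800000 + i) := by
      have e0 : (0x800000 : Word) = UInt64.ofNat 0x800000 := rfl
      rw [e0, ← UInt64.ofNat_add]
    rw [e, start_zero im him c hc inp (0x800000 + i) (Or.inr (Or.inr (Or.inr ⟨by omega, by omega⟩)))]
    unfold wordByte
    simp only [Nat.zero_div, Nat.zero_mod]
    rfl
  rw [readLE_of_wordBytes _ _ 8 0 hz]

/-- **The heap region starts wholly poisoned**, in the form `Asan.HeapInv.empty` asks (`hpois`): every granule of [800000H, C00000H)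
has a shadow byte ≥ 128 (it is FFH: `start_arena_poisoned`). -/
theorem start_heap_poisoned (im : Image) (him : im.OK) (c : Nat) (hc : c = 0 ∨ c = 3) (inp : List UInt8)
    (hlen : inp.length ≤ 0x1FF000) (g : Nat) (h1 : 0x800000 / 8 ≤ g) (h2 : g < 0xC00000 / 8) :
    128 ≤ shadowOf (startU im c inp).mem g := by
  rw [start_arena_poisoned im him c hc inp hlen g ⟨by omega, by omega⟩]
  decide

/-! ### Registers of the start state -/

theorem boot_regs (c : Nat) : (bootMachine c).regs = Vector.replicate 32 0 := by
  have e : (bootMachine c).regs = (bootMachine 0).regs := rfl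
  rw [e]
  decide

theorem boot_flags_eq (c : Nat) : (bootMachine c).flags = ⟨2⟩ := by
  have e : (bootMachine c).flags = (bootMachine 0).flags := rfl
  rw [e]
  decide

theorem boot_mxcsr (c : Nat) : (bootMachine c).mxcsr = 0x1F80 := by
  have e : (bootMachine c).mxcsr = (bootMachine 0).mxcsr := rfl
  rw [e]
  decide

set_option maxRecDepth 100000 in
set_option exponentiation.threshold 600 in
theorem boot_zmm (c : Nat) : (bootMachine c).zmm = Vector.replicate 32 0 := by
  have e : (bootMachine c).zmm = (bootMachine 0).zmm := rfl
  rw [e]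
  decide

/-- RIP is at the entry point. -/
theorem start_rip (im : Image) (c : Nat) (inp : List UInt8) : (startU im c inp).rip = im.entry := rfl

/-- **RSP = 800000H, every other general register is 0.** -/
theorem start_reg (im : Image) (c : Nat) (inp : List UInt8) (r : Reg) :
    (startU im c inp).reg r = if r = .rsp then RSP0 else 0 := by
  have e : (startU im c inp).regs = (Vector.replicate 32 0).set Reg.rsp.idx RSP0 := by
    show (bootMachine c).regs.set Reg.rsp.idx RSP0 = _
    rw [boot_regs]
  unfold State.reg
  rw [e]
  cases r <;> rfl

/-- RFLAGS = 2: every flag is clear. In particular DF = 0 (the System V ABI's condition on entry of a function) and IF = 0. -/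
theorem start_flags (im : Image) (c : Nat) (inp : List UInt8) : (startU im c inp).flags = ⟨2⟩ := by
  show (bootMachine c).flags = _
  exact boot_flags_eq c

/-- The direction flag is clear: the System V ABI's condition at every function boundary holds at the start. -/
theorem start_df (im : Image) (c : Nat) (inp : List UInt8) : (startU im c inp).flags .df = false := by
  rw [start_flags]
  decide

/-- MXCSR = 1F80H: every SSE exception masked, round to nearest, no flag set. -/
theorem start_mxcsr (im : Image) (c : Nat) (inp : List UInt8) : (startU im c inp).mxcsr = 0x1F80 := by
  show (bootMachine c).mxcsr = _
  exact boot_mxcsr c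

/-- The six SSE exception masks are set (`User.SseOK` of UserX/SseBase.lean, in its unfolded form). -/
theorem start_sse_masks (im : Image) (c : Nat) (inp : List UInt8) : (startU im c inp).mxcsr &&& 0x1F80 = 0x1F80 := by
  rw [start_mxcsr]
  decide

/-- The vector registers are 0. -/
theorem start_zmm (im : Image) (c : Nat) (inp : List UInt8) : (startU im c inp).zmm = Vector.replicate 32 0 := by
  show (bootMachine c).zmm = _
  exact boot_zmm c

end ProgX
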